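-- pv_equiv track=rewrite | github.com/asliddinbaxtiyorov406-ops/MUROJAT-BOT- | main.py | group_regions_by_signal
-- ===== SOURCE A (Python) =====
-- QAMASHI_HUDUDLARI = [
--     "Azlartepa",
--     "Badaxshon",
--     "Balandchayla",
--     "Berdoli",
--     "Boburtepa",
--     "Bog'obod",
--     "Boybo'ri",
--     "Bunyodkor",
--     "Changak",
--     "Chim",
--     "Chuqurqishloq",
--     "Do'stlik",
--     "Do'vud",
--     "Elobod",
--     "G'ishtli",
--     "Guliston",
--     "Gulshan",
--     "Ibn Sino",
--     "Jonbuz",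
--     "Qamay",
--     "Kaptarxona",
--     "Katta O'ra",
--     "Qishlik",
--     "Qiziltepa",
--     "Ko'kbuloq",
--     "Loyqasoy",
--     "Mang'it",
--     "Mayda",
--     "Mehr",
--     "Navoiy",
--     "Nurli yo'l",
--     "Odoqjonbuz",
--     "O'lg'ubek",
--     "Olmazor",
--     "Oqg'uzar",
--     "Oqrabod",
--     "O'rtadara",
--     "Oynako'l",
--     "O'zbekiston",
--     "Paxtaobod",
--     "Qizilqishloq",
--     "Qorabog'",
--     "Qoratepa",
--     "Qorasuv",
--     "Qo'ng'irot",
--     "Quyiyangi",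
--     "Rabod",
--     "Samarqand",
--     "Sarbozor",
--     "Sohibkor",
--     "Tinchlik",
--     "To'qboy",
--     "Uzun",
--     "Yangi Avlod",
--     "Yortepa",
--     "Yuksalish",
-- ]
--
-- def classify_region_signal(unanswered_count: int) -> tuple[str, str]:
--     if unanswered_count >= 5:
--         return "\U0001F534", "Qizil"
--     if unanswered_count >= 2:
--         return "\U0001F7E1", "Sariq"
--     return "\U0001F7E2", "Yashil"
--
-- def group_regions_by_signal(region_counts: dict[str, int]) -> dict[str, list[tuple[str, int]]]:
--     grouped_regions: dict[str, list[tuple[str, int]]] = {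
--         "Qizil": [],
--         "Sariq": [],
--         "Yashil": [],
--     }
--
--     for region in QAMASHI_HUDUDLARI:
--         unanswered_count = int(region_counts.get(region, 0))
--         _, signal_name = classify_region_signal(unanswered_count)
--         grouped_regions[signal_name].append((region, unanswered_count))
--
--     for regions in grouped_regions.values():
--         regions.sort(key=lambda item: (-item[1], item[0]))
--
--     return grouped_regions
-- ===== SOURCE B (Python) =====
-- QAMASHI_HUDUDLARI = [
--     "Azlartepa", "Badaxshon", "Balandchayla", "Berdoli", "Boburtepa",
--     "Bog'obod", "Boybo'ri", "Bunyodkor", "Changak", "Chim",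
--     "Chuqurqishloq", "Do'stlik", "Do'vud", "Elobod", "G'ishtli",
--     "Guliston", "Gulshan", "Ibn Sino", "Jonbuz", "Qamay",
--     "Kaptarxona", "Katta O'ra", "Qishlik", "Qiziltepa", "Ko'kbuloq",
--     "Loyqasoy", "Mang'it", "Mayda", "Mehr", "Navoiy",
--     "Nurli yo'l", "Odoqjonbuz", "O'lg'ubek", "Olmazor", "Oqg'uzar",
--     "Oqrabod", "O'rtadara", "Oynako'l", "O'zbekiston", "Paxtaobod",
--     "Qizilqishloq", "Qorabog'", "Qoratepa", "Qorasuv", "Qo'ng'irot",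
--     "Quyiyangi", "Rabod", "Samarqand", "Sarbozor", "Sohibkor",
--     "Tinchlik", "To'qboy", "Uzun", "Yangi Avlod", "Yortepa", "Yuksalish",
-- ]
--
--
-- def group_regions_by_signal(region_counts):
--     # One global sort by (-count, name), then a single distributing pass:
--     # each bucket ends up in exactly the per-bucket sorted order.
--     pairs = sorted(
--         ((region, int(region_counts.get(region, 0))) for region in QAMASHI_HUDUDLARI),
--         key=lambda item: (-item[1], item[0]),
--     )
--     grouped_regions = {"Qizil": [], "Sariq": [], "Yashil": []}
--     for region, count in pairs:
--         if count >= 5: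
--             grouped_regions["Qizil"].append((region, count))
--         elif count >= 2:
--             grouped_regions["Sariq"].append((region, count))
--         else:
--             grouped_regions["Yashil"].append((region, count))
--     return grouped_regions
-- ===== Notes on version B (the rewrite author's own statement) =====
-- stated objective: alternative
-- what changed: Instead of dispatching each region into its bucket first and then sorting each of the three buckets separately, B sorts the whole (region, count) list once by (-count, name) and then distributes it into the pre-initialized buckets in one pass, relying on region names being distinct so each bucket comes out in exactly the same order.
import Mathlib
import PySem

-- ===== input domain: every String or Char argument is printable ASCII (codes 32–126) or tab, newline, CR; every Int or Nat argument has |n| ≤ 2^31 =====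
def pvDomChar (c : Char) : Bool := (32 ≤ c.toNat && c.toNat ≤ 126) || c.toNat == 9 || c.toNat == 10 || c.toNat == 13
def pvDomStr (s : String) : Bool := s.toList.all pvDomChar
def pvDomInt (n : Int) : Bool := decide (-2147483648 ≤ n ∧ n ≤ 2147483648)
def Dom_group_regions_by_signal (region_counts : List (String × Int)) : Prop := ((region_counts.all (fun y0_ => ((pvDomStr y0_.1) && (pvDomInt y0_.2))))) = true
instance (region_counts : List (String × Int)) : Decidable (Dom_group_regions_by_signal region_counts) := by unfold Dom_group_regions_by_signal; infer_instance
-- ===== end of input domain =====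

-- B replaces A's "dispatch into three buckets, then sort each bucket" by one global
-- sort of all (region, count) pairs followed by a single distributing pass (alternative
-- decomposition, same cost). Python A mutates its dict's value lists in place; the
-- equivalence proved here is about the return value.

def QAMASHI_HUDUDLARI : List String := [
  "Azlartepa", "Badaxshon", "Balandchayla", "Berdoli", "Boburtepa",
  "Bog'obod", "Boybo'ri", "Bunyodkor", "Changak", "Chim",
  "Chuqurqishloq", "Do'stlik", "Do'vud", "Elobod", "G'ishtli",
  "Guliston", "Gulshan", "Ibn Sino", "Jonbuz", "Qamay",
  "Kaptarxona", "Katta O'ra", "Qishlik", "Qiziltepa", "Ko'kbuloq",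
  "Loyqasoy", "Mang'it", "Mayda", "Mehr", "Navoiy",
  "Nurli yo'l", "Odoqjonbuz", "O'lg'ubek", "Olmazor", "Oqg'uzar",
  "Oqrabod", "O'rtadara", "Oynako'l", "O'zbekiston", "Paxtaobod",
  "Qizilqishloq", "Qorabog'", "Qoratepa", "Qorasuv", "Qo'ng'irot",
  "Quyiyangi", "Rabod", "Samarqand", "Sarbozor", "Sohibkor",
  "Tinchlik", "To'qboy", "Uzun", "Yangi Avlod", "Yortepa", "Yuksalish"]

-- ===== PORT A =====
def classify_region_signal (unanswered_count : Int) : String × String :=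
  if unanswered_count ≥ 5 then ("🔴", "Qizil")
  else if unanswered_count ≥ 2 then ("🟡", "Sariq")
  else ("🟢", "Yashil")

def group_regions_by_signal (region_counts : List (String × Int)) : List (String × List (String × Int)) :=
  let init : PySem.Dict String (List (String × Int)) :=
    PySem.Dict.mk [("Qizil", []), ("Sariq", []), ("Yashil", [])]
  let grouped := QAMASHI_HUDUDLARI.foldl (fun d region =>
      let unanswered_count := (PySem.Dict.mk region_counts).getD region 0
      let signal_name := (classify_region_signal unanswered_count).2
      d.modify signal_name [] (fun l => l ++ [(region, unanswered_count)])) init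
  -- second loop: each value list is sorted in place by key (-count, name)
  (PySem.Dict.mk (grouped.items.map (fun kv =>
      (kv.1, PySem.List.sorted2 kv.2 (fun item => -item.2) (fun item => item.1))))).items

-- ===== PORT B =====
def group_regions_by_signal_alt (region_counts : List (String × Int)) : List (String × List (String × Int)) :=
  let pairs := PySem.List.sorted2
      (QAMASHI_HUDUDLARI.map (fun region => (region, (PySem.Dict.mk region_counts).getD region 0)))
      (fun item => -item.2) (fun item => item.1)
  let grouped := pairs.foldl (fun d p =>
      if p.2 ≥ 5 then d.modify "Qizil" [] (fun l => l ++ [p])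
      else if p.2 ≥ 2 then d.modify "Sariq" [] (fun l => l ++ [p])
      else d.modify "Yashil" [] (fun l => l ++ [p]))
    (PySem.Dict.mk [("Qizil", []), ("Sariq", []), ("Yashil", [])])
  grouped.items

-- ===== PRECONDITION & SPEC =====
def Spec_group_regions_by_signal (region_counts : List (String × Int)) (out : List (String × List (String × Int))) : Prop := out = group_regions_by_signal_alt region_counts
instance (region_counts : List (String × Int)) (out : List (String × List (String × Int))) : Decidable (Spec_group_regions_by_signal region_counts out) := by unfold Spec_group_regions_by_signal; infer_instance

-- ===== CLAIM (what is proved, stated in full; the proofs are below) =====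
def Claim_equal_group_regions_by_signal : Prop := ∀ (region_counts : List (String × Int)), Dom_group_regions_by_signal region_counts → Spec_group_regions_by_signal region_counts (group_regions_by_signal region_counts)

-- ===== LEMMAS AND PROOFS =====

-- B's loop body, named for the proofs
def pvStep (d : PySem.Dict String (List (String × Int))) (p : String × Int) :
    PySem.Dict String (List (String × Int)) :=
  if p.2 ≥ 5 then d.modify "Qizil" [] (fun l => l ++ [p])
  else if p.2 ≥ 2 then d.modify "Sariq" [] (fun l => l ++ [p])
  else d.modify "Yashil" [] (fun l => l ++ [p])

def pvLexKey (p : String × Int) : Lex (Int × String) := toLex (-p.2, p.1)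

lemma pvLoopChar (l : List (String × Int)) (q s y : List (String × Int)) :
    l.foldl pvStep (PySem.Dict.mk [("Qizil", q), ("Sariq", s), ("Yashil", y)]) =
    PySem.Dict.mk [
      ("Qizil", q ++ l.filter (fun p => decide (p.2 ≥ 5))),
      ("Sariq", s ++ l.filter (fun p => !decide (p.2 ≥ 5) && decide (p.2 ≥ 2))),
      ("Yashil", y ++ l.filter (fun p => !decide (p.2 ≥ 5) && !decide (p.2 ≥ 2)))] := by
  induction l generalizing q s y with
  | nil => simp
  | cons p t ih =>
    by_cases h5 : p.2 ≥ 5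
    · simp [pvStep, h5, PySem.Dict.modify, PySem.Dict.insert, PySem.Dict.getD,
        PySem.Dict.get?, PySem.Dict.contains, ih]
    · by_cases h2 : p.2 ≥ 2 <;>
        simp [pvStep, h5, h2, PySem.Dict.modify, PySem.Dict.insert, PySem.Dict.getD,
          PySem.Dict.get?, PySem.Dict.contains, ih]

lemma pvSorted2_eq_sorted (xs : List (String × Int)) :
    PySem.List.sorted2 xs (fun item => -item.2) (fun item => item.1) =
    PySem.List.sorted xs pvLexKey := by
  have hb : (fun (a b : String × Int) =>
      decide ((fun item : String × Int => -item.2) a < (fun item : String × Int => -item.2) b) ||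
        !decide ((fun item : String × Int => -item.2) b < (fun item : String × Int => -item.2) a) &&
          decide ((fun item : String × Int => item.1) a < (fun item : String × Int => item.1) b)) =
      (fun a b => decide (pvLexKey a < pvLexKey b)) := by
    funext a b
    by_cases h1 : (-a.2 : Int) < -b.2
    · simp [h1, Prod.Lex.lt_iff, pvLexKey]
    · by_cases h1' : (-b.2 : Int) < -a.2
      · have : ¬ pvLexKey a < pvLexKey b := by
          simp only [pvLexKey, Prod.Lex.lt_iff, ofLex_toLex]
          rintro (h | ⟨he, -⟩) <;> omega
        simp [h1, h1', this]
      · have heq : (-a.2 : Int) = -b.2 := by omega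
        simp [pvLexKey, Prod.Lex.lt_iff, heq]
  unfold PySem.List.sorted2 PySem.List.sorted
  simp only [hb]
  simp

lemma pvNodupQamashi : QAMASHI_HUDUDLARI.Nodup := by decide

lemma pvFilterSorted (region_counts : List (String × Int)) (p : String × Int → Bool) :
    (PySem.List.sorted
        (QAMASHI_HUDUDLARI.map (fun region => (region, (PySem.Dict.mk region_counts).getD region 0)))
        pvLexKey).filter p =
    PySem.List.sorted
      ((QAMASHI_HUDUDLARI.map (fun region => (region, (PySem.Dict.mk region_counts).getD region 0))).filter p)
      pvLexKey := by
  set pairs := QAMASHI_HUDUDLARI.map (fun region => (region, (PySem.Dict.mk region_counts).getD region 0)) with hpairs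
  set S := PySem.List.sorted pairs pvLexKey with hS
  have hperm : S.Perm pairs := PySem.List.sorted_perm pairs pvLexKey false
  have hnodup_pairs : (pairs.map pvLexKey).Nodup := by
    have : (pairs.map pvLexKey).map (fun k => (ofLex k).2) = QAMASHI_HUDUDLARI := by
      simp [hpairs, List.map_map, Function.comp_def, pvLexKey]
    exact List.Nodup.of_map _ (this ▸ pvNodupQamashi)
  have hnodup : (S.map pvLexKey).Nodup := ((hperm.map pvLexKey).nodup_iff).mpr hnodup_pairs
  have hle : S.Pairwise (fun a b => pvLexKey a ≤ pvLexKey b) :=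
    PySem.List.sorted_pairwise pairs pvLexKey
  have hne : S.Pairwise (fun a b => pvLexKey a ≠ pvLexKey b) := List.pairwise_map.mp hnodup
  have hlt : S.Pairwise (fun a b => pvLexKey a < pvLexKey b) :=
    (hle.and hne).imp (fun ⟨h1, h2⟩ => lt_of_le_of_ne h1 h2)
  exact (PySem.List.sorted_eq_of_perm_of_pairwise_lt _ _ pvLexKey
    (hperm.filter p) (hlt.filter p)).symm

lemma pvStepA_eq (region_counts : List (String × Int))
    (d : PySem.Dict String (List (String × Int))) (region : String) :
    (let unanswered_count := (PySem.Dict.mk region_counts).getD region 0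
     let signal_name := (classify_region_signal unanswered_count).2
     d.modify signal_name [] (fun l => l ++ [(region, unanswered_count)])) =
    pvStep d (region, (PySem.Dict.mk region_counts).getD region 0) := by
  simp only [pvStep, classify_region_signal]
  split_ifs <;> rfl

-- ===== VERDICT (by name: the statement is the Claim_ definition above) =====
theorem group_regions_by_signal_spec : Claim_equal_group_regions_by_signal := by
  intro region_counts _
  unfold Spec_group_regions_by_signal group_regions_by_signal group_regions_by_signal_alt
  simp only []
  rw [show (fun (d : PySem.Dict String (List (String × Int))) (region : String) =>
        let unanswered_count := (PySem.Dict.mk region_counts).getD region 0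
        let signal_name := (classify_region_signal unanswered_count).2
        d.modify signal_name [] (fun l => l ++ [(region, unanswered_count)])) =
      (fun d region => pvStep d (region, (PySem.Dict.mk region_counts).getD region 0))
    from funext fun d => funext fun r => pvStepA_eq region_counts d r]
  rw [← List.foldl_map (f := fun region => (region, (PySem.Dict.mk region_counts).getD region 0))
        (g := pvStep)]
  rw [show (fun (d : PySem.Dict String (List (String × Int))) (p : String × Int) =>
        if p.2 ≥ 5 then d.modify "Qizil" [] (fun l => l ++ [p])
        else if p.2 ≥ 2 then d.modify "Sariq" [] (fun l => l ++ [p])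
        else d.modify "Yashil" [] (fun l => l ++ [p])) = pvStep from rfl]
  rw [pvLoopChar, pvLoopChar]
  simp only [List.map, List.nil_append]
  rw [pvSorted2_eq_sorted, pvSorted2_eq_sorted, pvSorted2_eq_sorted, pvSorted2_eq_sorted,
    pvFilterSorted, pvFilterSorted, pvFilterSorted]
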